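-- pv_equiv track=rewrite | github.com/Leela-Akash/resumeai-scanner | backend/services/grok_service.py | _categorize_bullet
-- ===== SOURCE A (Python) =====
-- BACKEND_WORDS  = {"api", "backend", "microservice", "fastapi", "django", "flask", "spring", "server", "endpoint", "rest", "graphql"}
--
-- FRONTEND_WORDS = {"frontend", "react", "angular", "vue", "ui", "ux", "dashboard", "interface", "component", "html", "css", "next"}
--
-- DEVOPS_WORDS   = {"docker", "kubernetes", "deploy", "ci/cd", "jenkins", "pipeline", "terraform", "infrastructure", "cloud", "aws", "gcp", "azure"}
--
-- DB_WORDS       = {"database", "sql", "mysql", "postgres", "mongodb", "redis", "schema", "query", "firebase", "nosql", "orm"}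
--
-- def _categorize_bullet(bullet: str, tech: list) -> str:
--     words = set(bullet.lower().split())
--     tech_lower = {t.lower() for t in tech}
--     if words & DEVOPS_WORDS or tech_lower & {"docker", "kubernetes", "terraform", "aws", "gcp", "azure"}:
--         return "devops"
--     if words & DB_WORDS:
--         return "database"
--     if words & FRONTEND_WORDS or tech_lower & {"react", "angular", "vue", "html", "css"}:
--         return "frontend"
--     if words & BACKEND_WORDS:
--         return "backend"
--     return "fullstack"
-- ===== SOURCE B (Python) =====
-- BACKEND_WORDS  = {"api", "backend", "microservice", "fastapi", "django", "flask", "spring", "server", "endpoint", "rest", "graphql"}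
--
-- FRONTEND_WORDS = {"frontend", "react", "angular", "vue", "ui", "ux", "dashboard", "interface", "component", "html", "css", "next"}
--
-- DEVOPS_WORDS   = {"docker", "kubernetes", "deploy", "ci/cd", "jenkins", "pipeline", "terraform", "infrastructure", "cloud", "aws", "gcp", "azure"}
--
-- DB_WORDS       = {"database", "sql", "mysql", "postgres", "mongodb", "redis", "schema", "query", "firebase", "nosql", "orm"}
--
-- _WORD_SETS = [DEVOPS_WORDS, DB_WORDS, FRONTEND_WORDS, BACKEND_WORDS]
-- _TECH_SETS = [{"docker", "kubernetes", "terraform", "aws", "gcp", "azure"}, set(),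
--               {"react", "angular", "vue", "html", "css"}, set()]
-- _CATS = ("devops", "database", "frontend", "backend", "fullstack")
--
--
-- def _first_rank(token, sets):
--     for i, s in enumerate(sets):
--         if token in s:
--             return i
--     return len(sets)
--
--
-- def _categorize_bullet(bullet: str, tech: list) -> str:
--     # Classify each token individually and keep the best (lowest) priority rank.
--     best = 4
--     for w in bullet.lower().split():
--         best = min(best, _first_rank(w, _WORD_SETS))
--     for t in tech:
--         best = min(best, _first_rank(t.lower(), _TECH_SETS))
--     return _CATS[best]
-- ===== Notes on version B (the rewrite author's own statement) =====
-- stated objective: alternative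
-- what changed: Instead of intersecting the word/tech sets category by category in an if-chain, B classifies each token once (_first_rank = first priority-ordered set containing it), folds the minimum rank over all tokens, and indexes a category table; the per-category set intersections disappear.
import Mathlib
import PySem

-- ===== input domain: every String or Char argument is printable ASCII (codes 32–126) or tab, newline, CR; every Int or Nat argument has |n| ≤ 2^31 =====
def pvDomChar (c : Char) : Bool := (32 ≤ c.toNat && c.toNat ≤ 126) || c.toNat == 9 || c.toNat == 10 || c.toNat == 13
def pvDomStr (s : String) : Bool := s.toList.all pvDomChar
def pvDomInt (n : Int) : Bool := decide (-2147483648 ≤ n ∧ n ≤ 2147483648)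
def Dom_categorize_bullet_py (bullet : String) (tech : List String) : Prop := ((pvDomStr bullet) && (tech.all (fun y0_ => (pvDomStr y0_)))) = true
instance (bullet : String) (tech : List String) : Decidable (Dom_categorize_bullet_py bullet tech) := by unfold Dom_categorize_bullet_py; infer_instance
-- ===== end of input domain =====

-- B replaces A's per-category set intersections by classifying each token once (first matching
-- priority set) and folding the minimum rank into a category-table index (objective: alternative).


-- shared module constants (Python sets, shared by both module-level sources)
def pvBACKEND_WORDS : PySem.Set String := PySem.Set.ofList ["api", "backend", "microservice", "fastapi", "django", "flask", "spring", "server", "endpoint", "rest", "graphql"]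
def pvFRONTEND_WORDS : PySem.Set String := PySem.Set.ofList ["frontend", "react", "angular", "vue", "ui", "ux", "dashboard", "interface", "component", "html", "css", "next"]
def pvDEVOPS_WORDS : PySem.Set String := PySem.Set.ofList ["docker", "kubernetes", "deploy", "ci/cd", "jenkins", "pipeline", "terraform", "infrastructure", "cloud", "aws", "gcp", "azure"]
def pvDB_WORDS : PySem.Set String := PySem.Set.ofList ["database", "sql", "mysql", "postgres", "mongodb", "redis", "schema", "query", "firebase", "nosql", "orm"]
def pvDEVOPS_TECH : PySem.Set String := PySem.Set.ofList ["docker", "kubernetes", "terraform", "aws", "gcp", "azure"]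
def pvFRONTEND_TECH : PySem.Set String := PySem.Set.ofList ["react", "angular", "vue", "html", "css"]

-- ===== PORT A =====
def categorize_bullet_py (bullet : String) (tech : List String) : String :=
  let words : PySem.Set String := PySem.Set.ofList (PySem.Str.split₀ (PySem.Str.lower bullet))
  let tech_lower : PySem.Set String := PySem.Set.ofList (tech.map (fun t => PySem.Str.lower t))
  if PySem.Set.inter words pvDEVOPS_WORDS ≠ [] ∨ PySem.Set.inter tech_lower pvDEVOPS_TECH ≠ [] then "devops"
  else if PySem.Set.inter words pvDB_WORDS ≠ [] then "database"
  else if PySem.Set.inter words pvFRONTEND_WORDS ≠ [] ∨ PySem.Set.inter tech_lower pvFRONTEND_TECH ≠ [] then "frontend"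
  else if PySem.Set.inter words pvBACKEND_WORDS ≠ [] then "backend"
  else "fullstack"

-- ===== PORT B =====
def pvWordSets : List (PySem.Set String) := [pvDEVOPS_WORDS, pvDB_WORDS, pvFRONTEND_WORDS, pvBACKEND_WORDS]
def pvTechSets : List (PySem.Set String) := [pvDEVOPS_TECH, PySem.Set.empty, pvFRONTEND_TECH, PySem.Set.empty]
def pvCats : List String := ["devops", "database", "frontend", "backend", "fullstack"]

-- Source B's _first_rank: index of the first set containing the token, len(sets) if none
def pvFirstRank (token : String) : List (PySem.Set String) → Nat
  | [] => 0
  | s :: rest => if PySem.Set.contains s token then 0 else pvFirstRank token rest + 1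

def categorize_bullet_py_alt (bullet : String) (tech : List String) : String :=
  let best1 := (PySem.Str.split₀ (PySem.Str.lower bullet)).foldl
      (fun b w => min b (pvFirstRank w pvWordSets)) 4
  let best := tech.foldl
      (fun b t => min b (pvFirstRank (PySem.Str.lower t) pvTechSets)) best1
  -- Source B's _CATS[best]: best ≤ 4 always holds, so the index is in range; getD is exact here
  pvCats.getD best "fullstack"

-- ===== PRECONDITION & SPEC =====
def Spec_categorize_bullet_py (bullet : String) (tech : List String) (out : String) : Prop := out = categorize_bullet_py_alt bullet tech
instance (bullet : String) (tech : List String) (out : String) : Decidable (Spec_categorize_bullet_py bullet tech out) := by unfold Spec_categorize_bullet_py; infer_instance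

-- ===== CLAIM (what is proved, stated in full; the proofs are below) =====
def Claim_equal_categorize_bullet_py : Prop := ∀ (bullet : String) (tech : List String), Dom_categorize_bullet_py bullet tech → Spec_categorize_bullet_py bullet tech (categorize_bullet_py bullet tech)

-- ===== LEMMAS AND PROOFS =====

theorem pv_foldl_min_le_init {α : Type} (f : α → Nat) (l : List α) (a : Nat) :
    l.foldl (fun b x => min b (f x)) a ≤ a := by
  induction l generalizing a with
  | nil => simp
  | cons x xs ih => exact le_trans (ih (min a (f x))) (min_le_left _ _)

theorem pv_foldl_min_le_mem {α : Type} (f : α → Nat) (l : List α) (a : Nat) (x : α)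
    (hx : x ∈ l) : l.foldl (fun b x => min b (f x)) a ≤ f x := by
  induction l generalizing a with
  | nil => cases hx
  | cons y ys ih =>
    rcases List.mem_cons.mp hx with h | h
    · subst h
      exact le_trans (pv_foldl_min_le_init f ys (min a (f x))) (min_le_right _ _)
    · exact ih (min a (f y)) h

theorem pv_le_foldl_min {α : Type} (f : α → Nat) (l : List α) (a i : Nat)
    (ha : i ≤ a) (h : ∀ x ∈ l, i ≤ f x) : i ≤ l.foldl (fun b x => min b (f x)) a := by
  induction l generalizing a with
  | nil => exact ha
  | cons y ys ih =>
    exact ih (min a (f y)) (le_min ha (h y List.mem_cons_self))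
      (fun x hx => h x (List.mem_cons_of_mem _ hx))

theorem pv_wr_eq (w : String) : pvFirstRank w pvWordSets =
    if w ∈ pvDEVOPS_WORDS then 0 else if w ∈ pvDB_WORDS then 1
    else if w ∈ pvFRONTEND_WORDS then 2 else if w ∈ pvBACKEND_WORDS then 3 else 4 := by
  simp only [pvWordSets, pvFirstRank, PySem.Set.contains_eq_listContains, List.contains_eq_mem]
  split_ifs <;> simp_all

theorem pv_tr_eq (t : String) : pvFirstRank t pvTechSets =
    if t ∈ pvDEVOPS_TECH then 0 else if t ∈ pvFRONTEND_TECH then 2 else 4 := by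
  simp only [pvTechSets, pvFirstRank, PySem.Set.contains_eq_listContains, List.contains_eq_mem,
    PySem.Set.empty]
  split_ifs <;> simp_all

theorem pv_inter_ne (l : List String) (t : PySem.Set String) :
    PySem.Set.inter (PySem.Set.ofList l) t ≠ [] ↔ ∃ x ∈ l, x ∈ t := by
  constructor
  · intro h
    obtain ⟨x, hx⟩ := List.exists_mem_of_ne_nil _ h
    obtain ⟨h1, h2⟩ := (PySem.Set.mem_inter _ _ _).mp hx
    exact ⟨x, (PySem.Set.mem_ofList _ _).mp h1, h2⟩
  · rintro ⟨x, hl, ht⟩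
    exact List.ne_nil_of_mem ((PySem.Set.mem_inter _ _ _).mpr ⟨(PySem.Set.mem_ofList _ _).mpr hl, ht⟩)

-- ===== VERDICT (by name: the statement is the Claim_ definition above) =====
theorem categorize_bullet_py_spec : Claim_equal_categorize_bullet_py := by
  intro bullet tech _
  unfold Spec_categorize_bullet_py categorize_bullet_py categorize_bullet_py_alt
  simp only [pv_inter_ne]
  set ws := PySem.Str.split₀ (PySem.Str.lower bullet) with hws
  set best1 := ws.foldl (fun b w => min b (pvFirstRank w pvWordSets)) 4 with hb1
  set best := tech.foldl (fun b t => min b (pvFirstRank (PySem.Str.lower t) pvTechSets)) best1 with hb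
  have hub_w : ∀ w ∈ ws, best ≤ pvFirstRank w pvWordSets := by
    intro w hw
    exact le_trans (pv_foldl_min_le_init _ tech best1) (pv_foldl_min_le_mem _ ws 4 w hw)
  have hub_t : ∀ t ∈ tech, best ≤ pvFirstRank (PySem.Str.lower t) pvTechSets := by
    intro t ht
    exact pv_foldl_min_le_mem _ tech best1 t ht
  have hlb : ∀ i : Nat, i ≤ 4 → (∀ w ∈ ws, i ≤ pvFirstRank w pvWordSets) →
      (∀ t ∈ tech, i ≤ pvFirstRank (PySem.Str.lower t) pvTechSets) → i ≤ best := by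
    intro i h4 hw ht
    exact pv_le_foldl_min _ tech best1 i (pv_le_foldl_min _ ws 4 i h4 hw) ht
  by_cases h0 : (∃ w ∈ ws, w ∈ pvDEVOPS_WORDS) ∨ (∃ x ∈ tech.map (fun t => PySem.Str.lower t), x ∈ pvDEVOPS_TECH)
  · rw [if_pos h0]
    have : best = 0 := by
      rcases h0 with ⟨w, hw, hm⟩ | ⟨x, hx, hm⟩
      · have := hub_w w hw; rw [pv_wr_eq, if_pos hm] at this; omega
      · obtain ⟨t, ht, rfl⟩ := List.mem_map.mp hx
        have := hub_t t ht; rw [pv_tr_eq, if_pos hm] at this; omega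
    rw [this]; rfl
  · rw [if_neg h0]
    push_neg at h0
    obtain ⟨h0w, h0t⟩ := h0
    by_cases h1 : ∃ w ∈ ws, w ∈ pvDB_WORDS
    · rw [if_pos h1]
      have : best = 1 := by
        obtain ⟨w, hw, hm⟩ := h1
        have hub := hub_w w hw
        rw [pv_wr_eq, if_neg (h0w w hw), if_pos hm] at hub
        have hlb1 := hlb 1 (by omega) (fun w hw => by
          rw [pv_wr_eq, if_neg (h0w w hw)]; split_ifs <;> omega)
          (fun t ht => by rw [pv_tr_eq, if_neg (h0t _ (List.mem_map_of_mem ht))]; split_ifs <;> omega)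
        omega
      rw [this]; rfl
    · rw [if_neg h1]
      push_neg at h1
      by_cases h2 : (∃ w ∈ ws, w ∈ pvFRONTEND_WORDS) ∨ (∃ x ∈ tech.map (fun t => PySem.Str.lower t), x ∈ pvFRONTEND_TECH)
      · rw [if_pos h2]
        have : best = 2 := by
          have hub : best ≤ 2 := by
            rcases h2 with ⟨w, hw, hm⟩ | ⟨x, hx, hm⟩
            · have := hub_w w hw; rw [pv_wr_eq] at this; split_ifs at this <;> omega
            · obtain ⟨t, ht, rfl⟩ := List.mem_map.mp hx
              have := hub_t t ht; rw [pv_tr_eq] at this; split_ifs at this <;> omega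
          have hlb2 := hlb 2 (by omega) (fun w hw => by
            rw [pv_wr_eq, if_neg (h0w w hw), if_neg (h1 w hw)]; split_ifs <;> omega)
            (fun t ht => by rw [pv_tr_eq, if_neg (h0t _ (List.mem_map_of_mem ht))]; split_ifs <;> omega)
          omega
        rw [this]; rfl
      · rw [if_neg h2]
        push_neg at h2
        obtain ⟨h2w, h2t⟩ := h2
        by_cases h3 : ∃ w ∈ ws, w ∈ pvBACKEND_WORDS
        · rw [if_pos h3]
          have : best = 3 := by
            have hub : best ≤ 3 := by
              obtain ⟨w, hw, hm⟩ := h3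
              have := hub_w w hw; rw [pv_wr_eq] at this; split_ifs at this <;> omega
            have hlb3 := hlb 3 (by omega) (fun w hw => by
              rw [pv_wr_eq, if_neg (h0w w hw), if_neg (h1 w hw), if_neg (h2w w hw)]
              split_ifs <;> omega)
              (fun t ht => by
                rw [pv_tr_eq, if_neg (h0t _ (List.mem_map_of_mem ht)),
                  if_neg (h2t _ (List.mem_map_of_mem ht))]
                omega)
            omega
          rw [this]; rfl
        · rw [if_neg h3]
          push_neg at h3
          have : best = 4 := by
            have hub : best ≤ 4 := le_trans (pv_foldl_min_le_init _ tech best1)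
              (pv_foldl_min_le_init _ ws 4)
            have hlb4 := hlb 4 (by omega) (fun w hw => by
              rw [pv_wr_eq, if_neg (h0w w hw), if_neg (h1 w hw), if_neg (h2w w hw),
                if_neg (h3 w hw)])
              (fun t ht => by
                rw [pv_tr_eq, if_neg (h0t _ (List.mem_map_of_mem ht)),
                  if_neg (h2t _ (List.mem_map_of_mem ht))])
            omega
          rw [this]; rfl
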